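-- pv_equiv track=rewrite | github.com/robai2002/Leetcode | Problems/3963-number-of-perfect-pairs/number-of-perfect-pairs.py | perfectPairs
-- ===== SOURCE A (Python) =====
-- from typing import List
--
-- def perfectPairs(nums: List[int]) -> int:
--
--     arr = sorted(abs(x) for x in nums)
--     n = len(arr)
--     j = 0
--     ans = 0
--
--
--     for i in range(n):
--         while j < n and arr[j] <= 2 * arr[i]:
--             j += 1
--         ans += (j - i - 1)
--
--     return ans
-- ===== SOURCE B (Python) =====
-- from typing import List
--
-- def _bisect_right(a, x):
--     lo, hi = 0, len(a)
--     while lo < hi: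
--         mid = (lo + hi) // 2
--         if x < a[mid]:
--             hi = mid
--         else:
--             lo = mid + 1
--     return lo
--
-- def perfectPairs(nums: List[int]) -> int:
--     arr = sorted(abs(x) for x in nums)
--     n = len(arr)
--     ans = 0
--     for i in range(n):
--         p = _bisect_right(arr, 2 * arr[i])
--         ans += p - i - 1
--     return ans
-- ===== Notes on version B (the rewrite author's own statement) =====
-- stated objective: alternative
-- what changed: Replaced the stateful amortized two-pointer sweep by n independent hand-rolled bisect_right binary searches over the sorted absolute values.
import Mathlib
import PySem

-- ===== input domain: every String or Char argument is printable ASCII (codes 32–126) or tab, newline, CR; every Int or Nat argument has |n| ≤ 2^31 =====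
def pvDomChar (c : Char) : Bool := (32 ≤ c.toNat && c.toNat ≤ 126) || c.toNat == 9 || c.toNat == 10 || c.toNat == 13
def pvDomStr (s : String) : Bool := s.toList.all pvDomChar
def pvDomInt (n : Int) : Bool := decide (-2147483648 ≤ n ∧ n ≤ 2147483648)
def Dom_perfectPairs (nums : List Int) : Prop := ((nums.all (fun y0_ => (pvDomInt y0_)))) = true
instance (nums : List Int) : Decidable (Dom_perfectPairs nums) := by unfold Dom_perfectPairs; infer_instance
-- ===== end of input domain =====

-- B replaces A's stateful two-pointer sweep by independent bisect_right binary searches (alternative decomposition, same asymptotic cost).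

-- ===== PORT A =====
-- the 'while j < n and arr[j] <= 2 * arr[i]: j += 1' loop
def pvAdvance (arr : List Int) (i : Int) (j : Int) : Int :=
  if h : j < (arr.length : Int) ∧ PySem.List.pyGetD arr j 0 ≤ 2 * PySem.List.pyGetD arr i 0 then
    pvAdvance arr i (j + 1)
  else j
termination_by ((arr.length : Int) - j).toNat
decreasing_by omega

def perfectPairs (nums : List Int) : Int :=
  let arr := PySem.List.sorted (nums.map (fun x => |x|)) (fun y => y)
  let n : Int := arr.length
  let res := (PySem.List.pyRange 0 n).foldl
      (fun (st : Int × Int) i =>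
        let j := pvAdvance arr i st.1
        (j, st.2 + (j - i - 1))) (0, 0)
  res.2

-- ===== PORT B =====
-- bounds of the binary-search step: lo ≤ (lo+hi)//2 < hi  (used for termination)
theorem pvMid_bounds {lo hi : Int} (h : lo < hi) :
    lo ≤ PySem.Int.floordiv (lo + hi) 2 ∧ PySem.Int.floordiv (lo + hi) 2 < hi := by
  have : PySem.Int.floordiv (lo + hi) 2 = (lo + hi) / 2 := by
    simp [PySem.Int.floordiv, Int.fdiv_eq_ediv]
  rw [this]; omega

-- Source B's hand-written _bisect_right, step for step
def pvBisectR (a : List Int) (x : Int) (lo hi : Int) : Int :=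
  if h : lo < hi then
    let mid := PySem.Int.floordiv (lo + hi) 2
    if x < PySem.List.pyGetD a mid 0 then pvBisectR a x lo mid
    else pvBisectR a x (mid + 1) hi
  else lo
termination_by (hi - lo).toNat
decreasing_by
  · have := pvMid_bounds h; omega
  · have := pvMid_bounds h; omega

def perfectPairs_alt (nums : List Int) : Int :=
  let arr := PySem.List.sorted (nums.map (fun x => |x|)) (fun y => y)
  let n : Int := arr.length
  (PySem.List.pyRange 0 n).foldl
    (fun ans i =>
      let p := pvBisectR arr (2 * PySem.List.pyGetD arr i 0) 0 n
      ans + (p - i - 1)) 0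

-- ===== PRECONDITION & SPEC =====
def Spec_perfectPairs (nums : List Int) (out : Int) : Prop := out = perfectPairs_alt nums
instance (nums : List Int) (out : Int) : Decidable (Spec_perfectPairs nums out) := by unfold Spec_perfectPairs; infer_instance

-- ===== CLAIM (what is proved, stated in full; the proofs are below) =====
def Claim_equal_perfectPairs : Prop := ∀ (nums : List Int), Dom_perfectPairs nums → Spec_perfectPairs nums (perfectPairs nums)

-- ===== LEMMAS AND PROOFS =====

-- `r` is THE boundary of threshold `x` in `a`: everything before it is ≤ x, everything from it on is > x
def pvBnd (a : List Int) (x r : Int) : Prop :=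
  0 ≤ r ∧ r ≤ (a.length : Int) ∧
  (∀ k : ℕ, (k : Int) < r → a.getD k 0 ≤ x) ∧
  (∀ k : ℕ, r ≤ (k : Int) → k < a.length → x < a.getD k 0)

-- the nondecreasing-by-index property of the sorted array
def pvMono (a : List Int) : Prop :=
  ∀ p q : ℕ, p ≤ q → q < a.length → a.getD p 0 ≤ a.getD q 0

theorem pvBnd_uniq {a : List Int} {x r r' : Int}
    (h : pvBnd a x r) (h' : pvBnd a x r') : r = r' := by
  obtain ⟨h0, h1, h2, h3⟩ := h
  obtain ⟨h0', h1', h2', h3'⟩ := h'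
  by_contra hne
  rcases lt_or_gt_of_ne hne with hlt | hgt
  · have hk : (r.toNat : Int) = r := Int.toNat_of_nonneg h0
    have := h3 r.toNat (by omega) (by omega)
    have := h2' r.toNat (by omega)
    omega
  · have hk : (r'.toNat : Int) = r' := Int.toNat_of_nonneg h0'
    have := h3' r'.toNat (by omega) (by omega)
    have := h2 r'.toNat (by omega)
    omega

theorem pvGetD_int (a : List Int) (j : Int) (hj : 0 ≤ j) :
    PySem.List.pyGetD a j 0 = a.getD j.toNat 0 := by
  have h2 : ((j.toNat : ℕ) : Int) = j := Int.toNat_of_nonneg hj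
  calc PySem.List.pyGetD a j 0 = PySem.List.pyGetD a ((j.toNat : ℕ) : Int) 0 := by rw [h2]
    _ = a.getD j.toNat 0 := PySem.List.pyGetD_natCast a j.toNat 0

-- the while loop lands on the boundary, from any start below/at it with the prefix invariant
theorem pvAdvance_bnd (a : List Int) (i : Int) (hm : pvMono a) :
    ∀ j : Int, 0 ≤ j → j ≤ (a.length : Int) →
    (∀ k : ℕ, (k : Int) < j → a.getD k 0 ≤ 2 * PySem.List.pyGetD a i 0) →
    pvBnd a (2 * PySem.List.pyGetD a i 0) (pvAdvance a i j) := by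
  intro j
  induction j using pvAdvance.induct a i with
  | case1 j h ih =>
    intro hj0 hjle hinv
    rw [pvAdvance, dif_pos h]
    apply ih (by omega) (by omega)
    intro k hk
    by_cases hkj : (k : Int) < j
    · exact hinv k hkj
    · have hkeq : (k : Int) = j := by omega
      have := h.2
      rw [pvGetD_int a j hj0] at this
      have : a.getD k 0 = a.getD j.toNat 0 := by congr 1; omega
      omega
  | case2 j h =>
    intro hj0 hjle hinv
    rw [pvAdvance, dif_neg h]
    refine ⟨hj0, hjle, hinv, ?_⟩
    intro k hk hklen
    have hjlt : j < (a.length : Int) := by omega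
    have hcond : ¬ PySem.List.pyGetD a j 0 ≤ 2 * PySem.List.pyGetD a i 0 := by
      intro hc; exact h ⟨hjlt, hc⟩
    rw [pvGetD_int a j hj0] at hcond
    have hmono := hm j.toNat k (by omega) hklen
    omega

-- the binary search lands on the boundary
theorem pvBisectR_bnd (a : List Int) (x : Int) (hm : pvMono a) :
    ∀ lo hi : Int, 0 ≤ lo → lo ≤ hi → hi ≤ (a.length : Int) →
    (∀ k : ℕ, (k : Int) < lo → a.getD k 0 ≤ x) →
    (∀ k : ℕ, hi ≤ (k : Int) → k < a.length → x < a.getD k 0) →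
    pvBnd a x (pvBisectR a x lo hi) := by
  intro lo hi
  induction lo, hi using pvBisectR.induct a x with
  | case1 lo hi h mid hlt ih =>
    intro h0 hle hhi hpre hpost
    rw [pvBisectR, dif_pos h, if_pos hlt]
    have hb := pvMid_bounds h
    apply ih h0 (by omega) (by omega) hpre
    intro k hk hklen
    have hx : x < a.getD mid.toNat 0 := by
      rw [pvGetD_int a mid (by omega)] at hlt; exact hlt
    have := hm mid.toNat k (by omega) hklen
    omega
  | case2 lo hi h mid hge ih =>
    intro h0 hle hhi hpre hpost
    rw [pvBisectR, dif_pos h, if_neg hge]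
    have hb := pvMid_bounds h
    apply ih (by omega) (by omega) hhi ?_ hpost
    intro k hk
    have hax : a.getD mid.toNat 0 ≤ x := by
      rw [pvGetD_int a mid (by omega)] at hge; omega
    have := hm k mid.toNat (by omega) (by omega)
    omega
  | case3 lo hi h =>
    intro h0 hle hhi hpre hpost
    rw [pvBisectR, dif_neg h]
    exact ⟨h0, by omega, hpre, fun k hk hklen => hpost k (by omega) hklen⟩

-- the two loop bodies, as in the ports
theorem pv_fold_eq (a : List Int) (hm : pvMono a) :
    ∀ (m : ℕ) (s j ans : Int), (((a.length : Int)) - s).toNat = m → 0 ≤ s → 0 ≤ j → j ≤ (a.length : Int) →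
    (s < (a.length : Int) → ∀ k : ℕ, (k : Int) < j → a.getD k 0 ≤ 2 * PySem.List.pyGetD a s 0) →
    ((PySem.List.pyRange s (a.length : Int)).foldl
        (fun (st : Int × Int) i =>
          let jj := pvAdvance a i st.1
          (jj, st.2 + (jj - i - 1))) (j, ans)).2
      = (PySem.List.pyRange s (a.length : Int)).foldl
        (fun ans i =>
          let p := pvBisectR a (2 * PySem.List.pyGetD a i 0) 0 (a.length : Int)
          ans + (p - i - 1)) ans := by
  intro m
  induction m with
  | zero =>
    intro s j ans hms h0 hj0 hjle hinv
    rw [PySem.List.pyRange_one_eq_nil (by omega)]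
    simp
  | succ m ih =>
    intro s j ans hms h0 hj0 hjle hinv
    have hs : s < (a.length : Int) := by omega
    rw [PySem.List.pyRange_one_cons hs]
    simp only [List.foldl_cons]
    have hbA := pvAdvance_bnd a s hm j hj0 hjle (hinv hs)
    have hbB := pvBisectR_bnd a (2 * PySem.List.pyGetD a s 0) hm 0 (a.length : Int)
      le_rfl (by omega) le_rfl (by intro k hk; omega) (by intro k hk hkl; omega)
    have hje : pvAdvance a s j = pvBisectR a (2 * PySem.List.pyGetD a s 0) 0 (a.length : Int) :=
      pvBnd_uniq hbA hbB
    simp only [hje]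
    obtain ⟨hb0, hb1, hb2, hb3⟩ := hbB
    apply ih (s + 1) _ _ (by omega) (by omega) hb0 hb1
    intro hs1 k hk
    have hth : PySem.List.pyGetD a s 0 ≤ PySem.List.pyGetD a (s + 1) 0 := by
      rw [pvGetD_int a s h0, pvGetD_int a (s + 1) (by omega)]
      exact hm s.toNat (s + 1).toNat (by omega) (by omega)
    have := hb2 k hk
    omega

theorem pv_sorted_mono (xs : List Int) : pvMono (PySem.List.sorted xs (fun y => y)) := by
  intro p q hpq hq
  have hp := PySem.List.sorted_pairwise xs (fun y => y)
  rw [List.pairwise_iff_getElem] at hp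
  rcases Nat.eq_or_lt_of_le hpq with heq | hlt
  · subst heq; simp
  · have := hp p q (by omega) hq hlt
    rw [List.getD_eq_getElem _ _ (by omega), List.getD_eq_getElem _ _ hq]
    exact this

-- ===== VERDICT (by name: the statement is the Claim_ definition above) =====
theorem perfectPairs_spec : Claim_equal_perfectPairs := by
  intro nums _
  unfold Spec_perfectPairs perfectPairs perfectPairs_alt
  exact pv_fold_eq (PySem.List.sorted (nums.map (fun x => |x|)) (fun y => y))
    (pv_sorted_mono _) _ 0 0 0 rfl le_rfl le_rfl (by simp) (by intro _ k hk; omega)
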